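-- pv_equiv track=rewrite | github.com/qhy991/AICAS | EA/latency.py | array_to_string
-- ===== SOURCE A (Python) =====
-- def array_to_string(array, elem_bit):
--     val = 0
--     for i in range(len(array)):
--         tmp = array[i]
--         tmp2 = tmp
--
--         if tmp < 0:
--             tmp2 = 2**(elem_bit) + tmp
--
--         tmp2 = int(tmp2)
--         tmp3 = tmp2 * 2**(elem_bit*i)
--         val = val + tmp3
--     return val
-- ===== SOURCE B (Python) =====
-- def array_to_string(array, elem_bit):
--     P = 2 ** elem_bit
--
--     def pack(a):
--         # returns (packed value of a, P ** len(a))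
--         if not a:
--             return (0, 1)
--         if len(a) == 1:
--             x = a[0]
--             tmp2 = P + x if x < 0 else x
--             return (int(tmp2), P)
--         m = len(a) // 2
--         v1, w1 = pack(a[:m])
--         v2, w2 = pack(a[m:])
--         return (v1 + w1 * v2, w1 * w2)
--
--     return pack(array)[0]
-- ===== Notes on version B (the rewrite author's own statement) =====
-- stated objective: alternative
-- what changed: Replaces A's single loop with per-index positional powers 2**(elem_bit*i) by a divide-and-conquer pack: split the array in half, pack each half, and combine as v1 + w1*v2 while carrying w = P**len alongside; the negative-only two's-complement correction is kept per element.
-- outside the precondition, e.g. on array_to_string([1, 1], -1): A returns 1.5, B returns 1.5; on array_to_string([-2, 3], -2): A returns -0.25, B returns -0.25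
import Mathlib
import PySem

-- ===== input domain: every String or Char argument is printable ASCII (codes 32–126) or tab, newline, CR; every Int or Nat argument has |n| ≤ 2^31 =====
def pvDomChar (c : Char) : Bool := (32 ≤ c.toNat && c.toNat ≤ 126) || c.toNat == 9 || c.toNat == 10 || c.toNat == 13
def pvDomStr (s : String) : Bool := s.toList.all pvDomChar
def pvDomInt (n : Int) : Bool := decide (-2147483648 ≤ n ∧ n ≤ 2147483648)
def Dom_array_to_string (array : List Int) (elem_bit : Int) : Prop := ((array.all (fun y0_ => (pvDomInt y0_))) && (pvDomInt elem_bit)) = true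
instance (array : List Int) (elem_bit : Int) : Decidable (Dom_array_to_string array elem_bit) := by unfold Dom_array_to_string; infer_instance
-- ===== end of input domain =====

-- B packs the array by divide-and-conquer (split in half, combine with v1 + w1*v2 where w
-- tracks P**len) instead of A's per-index positional-power loop; same negative-only
-- two's-complement correction per element.


-- ===== PORT A =====
-- for i in range(len(array)): tmp = array[i]; tmp2 = tmp (negative-only correction);
-- val = val + tmp2 * 2**(elem_bit*i).  With elem_bit ≥ 0 (Pre_), 2**(elem_bit*i) = 2^(elem_bit.toNat * i).
def array_to_string (array : List Int) (elem_bit : Int) : Int :=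
  (List.range array.length).foldl
    (fun val i =>
      let tmp := array.getD i 0      -- array[i]; i < len(array), always in range
      let tmp2 := if tmp < 0 then 2 ^ elem_bit.toNat + tmp else tmp
      let tmp3 := tmp2 * 2 ^ (elem_bit.toNat * i)
      val + tmp3) 0

-- ===== PORT B =====
-- pack(a) returns (packed value of a, P ** len(a)); split at len//2 and combine.
def pvPack (P : Int) (a : List Int) : Int × Int :=
  if a.length = 0 then (0, 1)
  else if a.length = 1 then
    (let x := a.getD 0 0
     (if x < 0 then P + x else x, P))
  else
    let m := a.length / 2
    let p1 := pvPack P (a.take m)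
    let p2 := pvPack P (a.drop m)
    (p1.1 + p1.2 * p2.1, p1.2 * p2.2)
termination_by a.length
decreasing_by
  · simp only [List.length_take]; omega
  · simp only [List.length_drop]; omega

def array_to_string_alt (array : List Int) (elem_bit : Int) : Int :=
  (pvPack (2 ^ elem_bit.toNat) array).1

-- ===== PRECONDITION & SPEC =====
-- Pre_ excludes negative elem_bit: there 2**elem_bit is a Python float, so A's result goes
-- through float arithmetic and (for arrays of length ≥ 2, or with negative elements) is a
-- float, not a value of the declared Int type.
def Pre_array_to_string (_array : List Int) (elem_bit : Int) : Prop := 0 ≤ elem_bit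
instance (array : List Int) (elem_bit : Int) : Decidable (Pre_array_to_string array elem_bit) := by unfold Pre_array_to_string; infer_instance
def pvWitness_array_to_string : List Int × Int := ([3, -2, 7], 4)

def Spec_array_to_string (array : List Int) (elem_bit : Int) (out : Int) : Prop := out = array_to_string_alt array elem_bit
instance (array : List Int) (elem_bit : Int) (out : Int) : Decidable (Spec_array_to_string array elem_bit out) := by unfold Spec_array_to_string; infer_instance

-- ===== CLAIM (what is proved, stated in full; the proofs are below) =====
def Claim_equal_array_to_string : Prop := ∀ (array : List Int) (elem_bit : Int), Dom_array_to_string array elem_bit → Pre_array_to_string array elem_bit → Spec_array_to_string array elem_bit (array_to_string array elem_bit)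

-- ===== LEMMAS AND PROOFS =====

-- the shared per-element correction, abstracted over P := 2^elem_bit.toNat
def pvConv (P : Int) (x : Int) : Int := if x < 0 then P + x else x

-- reference form both ports are reduced to
def pvHorner (P : Int) : List Int → Int
  | [] => 0
  | x :: xs => pvConv P x + P * pvHorner P xs

-- an additive foldl is an initial value plus a mapped sum
lemma pv_foldl_add_sum (t : Nat → Int) (l : List Nat) (z : Int) :
    l.foldl (fun v i => v + t i) z = z + (l.map t).sum := by
  induction l generalizing z with
  | nil => simp
  | cons a l ih =>
    simp only [List.foldl_cons, List.map_cons, List.sum_cons, ih]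
    ring

-- A's positional sum equals the Horner form
lemma pv_sum_range_horner (P : Int) (array : List Int) :
    ((List.range array.length).map
      (fun i => (if array.getD i 0 < 0 then P + array.getD i 0 else array.getD i 0) * P ^ i)).sum
    = pvHorner P array := by
  induction array with
  | nil => simp [pvHorner]
  | cons x xs ih =>
    rw [show (x :: xs).length = xs.length + 1 from rfl, List.range_succ_eq_map]
    simp only [List.map_cons, List.map_map, List.sum_cons, Function.comp_def]
    have hc : ((List.range xs.length).map
        (fun i => (if (x :: xs).getD (Nat.succ i) 0 < 0 then P + (x :: xs).getD (Nat.succ i) 0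
                   else (x :: xs).getD (Nat.succ i) 0) * P ^ (Nat.succ i))).sum
        = P * ((List.range xs.length).map
            (fun i => (if xs.getD i 0 < 0 then P + xs.getD i 0 else xs.getD i 0) * P ^ i)).sum := by
      rw [← List.sum_map_mul_left]
      apply congrArg
      apply List.map_congr_left
      intro i _
      simp only [Nat.succ_eq_add_one, List.getD_cons_succ, pow_succ]
      ring
    rw [hc, ih]
    simp [pvHorner, pvConv]

lemma pvA_eq_horner (array : List Int) (elem_bit : Int) :
    array_to_string array elem_bit = pvHorner (2 ^ elem_bit.toNat) array := by
  unfold array_to_string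
  simp only [pow_mul]
  rw [pv_foldl_add_sum, pv_sum_range_horner, zero_add]

-- Horner over an append: the right half is weighted by P^len(left)
lemma pvHorner_append (P : Int) (xs ys : List Int) :
    pvHorner P (xs ++ ys) = pvHorner P xs + P ^ xs.length * pvHorner P ys := by
  induction xs with
  | nil => simp [pvHorner]
  | cons x xs ih =>
    simp only [List.cons_append, pvHorner, ih, List.length_cons, pow_succ]
    ring

-- pvPack computes (Horner value, P^length)
lemma pvPack_eq (P : Int) (a : List Int) :
    pvPack P a = (pvHorner P a, P ^ a.length) := by
  induction a using pvPack.induct P with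
  | case1 a h =>
    rw [pvPack, if_pos h]
    rw [List.length_eq_zero_iff.mp h]; simp [pvHorner]
  | case2 a h h1 =>
    rw [pvPack, if_neg h, if_pos h1]
    obtain ⟨x, hx⟩ := List.length_eq_one_iff.mp h1
    subst hx; simp [pvHorner, pvConv]
  | case3 a h h1 m iht ihd =>
    have hm : m = a.length / 2 := rfl
    rw [pvPack, if_neg h, if_neg h1]
    rw [hm] at iht ihd
    show ((pvPack P (List.take (a.length / 2) a)).1 +
            (pvPack P (List.take (a.length / 2) a)).2 * (pvPack P (List.drop (a.length / 2) a)).1,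
          (pvPack P (List.take (a.length / 2) a)).2 * (pvPack P (List.drop (a.length / 2) a)).2)
        = (pvHorner P a, P ^ a.length)
    rw [iht, ihd]
    have hap := pvHorner_append P (a.take (a.length / 2)) (a.drop (a.length / 2))
    simp only [List.take_append_drop] at hap
    simp only [List.length_take, List.length_drop] at hap ⊢
    have hmin : min (a.length / 2) a.length = a.length / 2 := by omega
    rw [hmin] at hap ⊢
    refine Prod.ext ?_ ?_
    · exact hap.symm
    · show P ^ (a.length / 2) * P ^ (a.length - a.length / 2) = P ^ a.length
      rw [← pow_add]; congr 1; omega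

lemma pvB_eq_horner (array : List Int) (elem_bit : Int) :
    array_to_string_alt array elem_bit = pvHorner (2 ^ elem_bit.toNat) array := by
  unfold array_to_string_alt
  rw [pvPack_eq]

-- ===== VERDICT (by name: the statement is the Claim_ definition above) =====
theorem array_to_string_spec : Claim_equal_array_to_string := by
  intro array elem_bit _ _
  unfold Spec_array_to_string
  rw [pvA_eq_horner, pvB_eq_horner]
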